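-- pv_equiv track=rewrite | github.com/wweertman/fhl_flume | create_arm_videos_then_clean.py | Left_index
-- ===== SOURCE A (Python) =====
-- def Left_index(points):
--
--     '''
--     Finding the left most point
--     '''
--     minn = 0
--     for i in range(1,len(points)):
--         if points[i][0] < points[minn][0]:
--             minn = i
--         elif points[i][0] == points[minn][0]:
--             if points[i][1] > points[minn][1]:
--                 minn = i
--     return minn
-- ===== SOURCE B (Python) =====
-- def Left_index(points):
--     if not points:
--         return 0
--     minx = min(p[0] for p in points)
--     best = -1
--     for i in range(len(points)):
--         if points[i][0] == minx and (best == -1 or points[i][1] > points[best][1]):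
--             best = i
--     return best
-- ===== Notes on version B (the rewrite author's own statement) =====
-- stated objective: alternative
-- what changed: Replaces A's single combined lexicographic scan (running best index with x-then-y comparison) by two differently-shaped passes: first compute the global minimum x, then scan indices keeping the first/largest-y index among those whose x equals that minimum.
import Mathlib
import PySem

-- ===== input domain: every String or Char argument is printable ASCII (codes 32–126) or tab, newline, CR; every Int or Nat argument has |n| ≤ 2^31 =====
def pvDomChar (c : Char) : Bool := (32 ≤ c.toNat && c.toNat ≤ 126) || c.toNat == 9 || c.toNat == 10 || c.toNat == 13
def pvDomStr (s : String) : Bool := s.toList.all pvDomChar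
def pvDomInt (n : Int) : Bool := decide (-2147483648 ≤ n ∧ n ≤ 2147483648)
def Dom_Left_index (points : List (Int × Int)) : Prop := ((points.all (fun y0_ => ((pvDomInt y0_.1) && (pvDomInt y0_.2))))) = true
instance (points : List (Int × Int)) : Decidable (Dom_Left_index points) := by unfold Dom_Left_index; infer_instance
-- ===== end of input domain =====

-- B replaces A's single combined lexicographic scan by two passes (global min x, then first/largest-y
-- index among ties); same O(n) cost, different decomposition. Both programs are total.

-- ===== PORT A =====
-- A's loop body: x strictly smaller wins, on equal x strictly larger y wins.
def pvStepA (points : List (Int × Int)) (minn i : Int) : Int :=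
  if (PySem.List.pyGetD points i (0, 0)).1 < (PySem.List.pyGetD points minn (0, 0)).1 then i
  else if (PySem.List.pyGetD points i (0, 0)).1 = (PySem.List.pyGetD points minn (0, 0)).1 then
    (if (PySem.List.pyGetD points i (0, 0)).2 > (PySem.List.pyGetD points minn (0, 0)).2 then i
     else minn)
  else minn


def Left_index (points : List (Int × Int)) : Int :=
  (PySem.List.pyRange 1 (points.length : Int) 1).foldl (pvStepA points) 0

-- ===== PORT B =====
-- B's loop body: keep the first index with x = minx and maximal y (strict '>' update; -1 = none found yet).
def pvStepB (points : List (Int × Int)) (minx best i : Int) : Int :=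
  if (PySem.List.pyGetD points i (0, 0)).1 = minx ∧
      (best = -1 ∨ (PySem.List.pyGetD points i (0, 0)).2 > (PySem.List.pyGetD points best (0, 0)).2)
  then i else best


def Left_index_alt (points : List (Int × Int)) : Int :=
  match points with
  | [] => 0
  | p :: ps =>
    let minx := (ps.map Prod.fst).foldl min p.1
    (PySem.List.pyRange 0 (((p :: ps).length : Nat) : Int) 1).foldl (pvStepB (p :: ps) minx) (-1)

-- ===== PRECONDITION & SPEC =====
def Spec_Left_index (points : List (Int × Int)) (out : Int) : Prop := out = Left_index_alt points
instance (points : List (Int × Int)) (out : Int) : Decidable (Spec_Left_index points out) := by unfold Spec_Left_index; infer_instance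

-- ===== CLAIM (what is proved, stated in full; the proofs are below) =====
def Claim_equal_Left_index : Prop := ∀ (points : List (Int × Int)), Dom_Left_index points → Spec_Left_index points (Left_index points)

-- ===== LEMMAS AND PROOFS =====

-- Joint loop invariant after both loops processed indices < m (m >= 1): A's minn is a valid
-- prefix argmin-of-x index, and B's best equals minn exactly when minn's x equals minx.
lemma pv_inv (points : List (Int × Int)) (minx : Int)
    (hminx : ∀ j : Int, 0 ≤ j → j < (points.length : Int) →
      minx ≤ (PySem.List.pyGetD points j (0, 0)).1)
    (m : Nat) (h1 : 1 ≤ m) (hm : m ≤ points.length) :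
    0 ≤ (PySem.List.pyRange 1 (m : Int) 1).foldl (pvStepA points) 0 ∧
    (PySem.List.pyRange 1 (m : Int) 1).foldl (pvStepA points) 0 < (m : Int) ∧
    (∀ j : Int, 0 ≤ j → j < (m : Int) →
      (PySem.List.pyGetD points ((PySem.List.pyRange 1 (m : Int) 1).foldl (pvStepA points) 0) (0, 0)).1
        ≤ (PySem.List.pyGetD points j (0, 0)).1) ∧
    ((PySem.List.pyGetD points ((PySem.List.pyRange 1 (m : Int) 1).foldl (pvStepA points) 0) (0, 0)).1 = minx →
      (PySem.List.pyRange 0 (m : Int) 1).foldl (pvStepB points minx) (-1)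
        = (PySem.List.pyRange 1 (m : Int) 1).foldl (pvStepA points) 0) ∧
    ((PySem.List.pyGetD points ((PySem.List.pyRange 1 (m : Int) 1).foldl (pvStepA points) 0) (0, 0)).1 ≠ minx →
      (PySem.List.pyRange 0 (m : Int) 1).foldl (pvStepB points minx) (-1) = -1) := by
  induction m with
  | zero => omega
  | succ m ih =>
    by_cases hm1 : m = 0
    · subst hm1
      rw [show ((0 + 1 : Nat) : Int) = 1 by norm_num,
        PySem.List.pyRange_one_eq_nil (by norm_num : (1 : Int) ≤ 1),
        show PySem.List.pyRange 0 1 1 = [0] from PySem.List.pyRange_one_singleton 0]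
      simp only [List.foldl_nil, List.foldl_cons]
      refine ⟨le_refl 0, by norm_num, ?_, ?_, ?_⟩
      · intro j hj0 hj1
        have hj : j = 0 := by omega
        rw [hj]
      · intro h
        unfold pvStepB
        rw [if_pos ⟨h, Or.inl rfl⟩]
      · intro h
        unfold pvStepB
        rw [if_neg (by rintro ⟨hc, _⟩; exact h hc)]
    · have h1m : 1 ≤ m := by omega
      have hmle : m ≤ points.length := by omega
      obtain ⟨ih0, ih1, ih2, ih3, ih4⟩ := ih h1m hmle
      set minn := (PySem.List.pyRange 1 (m : Int) 1).foldl (pvStepA points) 0 with hminn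
      set best := (PySem.List.pyRange 0 (m : Int) 1).foldl (pvStepB points minx) (-1) with hbest
      have hr1 : PySem.List.pyRange 1 ((m + 1 : Nat) : Int) 1
          = PySem.List.pyRange 1 (m : Int) 1 ++ [(m : Int)] := by
        push_cast
        exact PySem.List.pyRange_one_succ_right (by exact_mod_cast h1m)
      have hr0 : PySem.List.pyRange 0 ((m + 1 : Nat) : Int) 1
          = PySem.List.pyRange 0 (m : Int) 1 ++ [(m : Int)] := by
        push_cast
        exact PySem.List.pyRange_one_succ_right (by positivity)
      rw [hr1, hr0, List.foldl_append, List.foldl_append]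
      simp only [List.foldl_cons, List.foldl_nil, ← hminn, ← hbest]
      have hmlt : (m : Int) < (points.length : Int) := by exact_mod_cast Nat.lt_of_lt_of_le (Nat.lt_succ_self m) hm
      have hq : minx ≤ (PySem.List.pyGetD points (m : Int) (0, 0)).1 :=
        hminx _ (by positivity) hmlt
      have hpm : minx ≤ (PySem.List.pyGetD points minn (0, 0)).1 :=
        hminx _ ih0 (by omega)
      unfold pvStepA pvStepB
      by_cases hlt : (PySem.List.pyGetD points (m : Int) (0, 0)).1 < (PySem.List.pyGetD points minn (0, 0)).1
      · -- case 1: new strictly smaller x, A takes i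
        have hbm1 : best = -1 := ih4 (by omega)
        rw [if_pos hlt]
        by_cases hqmin : (PySem.List.pyGetD points (m : Int) (0, 0)).1 = minx
        · rw [if_pos ⟨hqmin, Or.inl hbm1⟩]
          refine ⟨by positivity, by push_cast; omega, ?_, fun _ => rfl, fun h => absurd hqmin h⟩
          intro j hj0 hj1
          by_cases hjm : j = (m : Int)
          · rw [hjm]
          · have := ih2 j hj0 (by push_cast at hj1 ⊢; omega)
            omega
        · rw [if_neg (by rintro ⟨h, _⟩; exact hqmin h)]
          refine ⟨by positivity, by push_cast; omega, ?_, fun h => absurd h hqmin, fun _ => hbm1⟩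
          intro j hj0 hj1
          by_cases hjm : j = (m : Int)
          · rw [hjm]
          · have := ih2 j hj0 (by push_cast at hj1 ⊢; omega)
            omega
      · rw [if_neg hlt]
        by_cases heq : (PySem.List.pyGetD points (m : Int) (0, 0)).1 = (PySem.List.pyGetD points minn (0, 0)).1
        · rw [if_pos heq]
          by_cases hy : (PySem.List.pyGetD points (m : Int) (0, 0)).2 > (PySem.List.pyGetD points minn (0, 0)).2
          · -- case 2: equal x, strictly larger y, A takes i
            rw [if_pos hy]
            by_cases hpmmin : (PySem.List.pyGetD points minn (0, 0)).1 = minx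
            · have hb : best = minn := ih3 hpmmin
              rw [if_pos ⟨heq.trans hpmmin, Or.inr (by rw [hb]; exact hy)⟩]
              refine ⟨by positivity, by push_cast; omega, ?_, fun _ => rfl,
                fun h => absurd (heq.trans hpmmin) h⟩
              intro j hj0 hj1
              by_cases hjm : j = (m : Int)
              · rw [hjm]
              · have := ih2 j hj0 (by push_cast at hj1 ⊢; omega)
                omega
            · rw [if_neg (by rintro ⟨h, _⟩; exact hpmmin (heq.symm.trans h)), ih4 hpmmin]
              refine ⟨by positivity, by push_cast; omega, ?_,
                fun h => absurd (heq.symm.trans h) hpmmin, fun _ => rfl⟩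
              intro j hj0 hj1
              by_cases hjm : j = (m : Int)
              · rw [hjm]
              · have := ih2 j hj0 (by push_cast at hj1 ⊢; omega)
                omega
          · -- case 3: equal x, y not larger, A keeps minn
            rw [if_neg hy]
            by_cases hpmmin : (PySem.List.pyGetD points minn (0, 0)).1 = minx
            · have hb : best = minn := ih3 hpmmin
              rw [if_neg (by
                rintro ⟨-, h2 | h2⟩
                · omega
                · rw [hb] at h2; exact hy h2)]
              refine ⟨ih0, by push_cast; omega, ?_, fun _ => hb, fun h => absurd hpmmin h⟩
              intro j hj0 hj1
              by_cases hjm : j = (m : Int)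
              · rw [hjm]; omega
              · exact ih2 j hj0 (by push_cast at hj1 ⊢; omega)
            · rw [if_neg (by rintro ⟨h, _⟩; exact hpmmin (heq.symm.trans h))]
              refine ⟨ih0, by push_cast; omega, ?_, fun h => absurd h hpmmin, fun _ => ih4 hpmmin⟩
              intro j hj0 hj1
              by_cases hjm : j = (m : Int)
              · rw [hjm]; omega
              · exact ih2 j hj0 (by push_cast at hj1 ⊢; omega)
        · -- case 4: new x strictly larger, both keep
          rw [if_neg heq, if_neg (by rintro ⟨h, _⟩; omega)]
          refine ⟨ih0, by push_cast; omega, ?_, ih3, ih4⟩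
          intro j hj0 hj1
          by_cases hjm : j = (m : Int)
          · rw [hjm]; omega
          · exact ih2 j hj0 (by push_cast at hj1 ⊢; omega)

-- minx (as B computes it) is the first-projection minimum of the whole list
lemma pv_minx_min? (p : Int × Int) (ps : List (Int × Int)) :
    PySem.List.min? ((p :: ps).map Prod.fst) (fun y => y)
      = some ((ps.map Prod.fst).foldl min p.1) := by
  rw [List.map_cons]
  exact PySem.List.min?_id_cons p.1 (ps.map Prod.fst)

lemma pv_alt_eq (p : Int × Int) (ps : List (Int × Int)) :
    Left_index_alt (p :: ps)
      = (PySem.List.pyRange 0 (((p :: ps).length : Nat) : Int) 1).foldl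
          (pvStepB (p :: ps) ((ps.map Prod.fst).foldl min p.1)) (-1) := rfl

-- ===== VERDICT (by name: the statement is the Claim_ definition above) =====
theorem Left_index_spec : Claim_equal_Left_index := by
  intro points _
  unfold Spec_Left_index
  match points with
  | [] => rfl
  | p :: ps =>
    set minx := (ps.map Prod.fst).foldl min p.1 with hminxdef
    have hisMin := PySem.List.min?_isMin (pv_minx_min? p ps)
    have hmem := PySem.List.min?_mem (pv_minx_min? p ps)
    have hminx : ∀ j : Int, 0 ≤ j → j < (((p :: ps).length : Nat) : Int) →
        minx ≤ (PySem.List.pyGetD (p :: ps) j (0, 0)).1 := by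
      intro j hj0 hj1
      have hinr : PySem.Raise.InRange (p :: ps).length j := by
        constructor <;> omega
      exact hisMin _ (List.mem_map_of_mem (PySem.List.pyGetD_mem (p :: ps) (0, 0) hinr))
    have hlen : 1 ≤ (p :: ps).length := by simp
    obtain ⟨h0, h1, h2, h3, -⟩ := pv_inv (p :: ps) minx hminx (p :: ps).length hlen (le_refl _)
    -- the final prefix minimum equals the global minimum minx
    obtain ⟨z, hz, hzfst⟩ := List.mem_map.mp hmem
    obtain ⟨k, hk, hke⟩ := List.mem_iff_getElem.mp hz
    have hkval : PySem.List.pyGetD (p :: ps) (k : Int) (0, 0) = z := by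
      rw [PySem.List.pyGetD_natCast, List.getD_eq_getElem _ _ hk, hke]
    have hle1 := h2 (k : Int) (by positivity) (by exact_mod_cast hk)
    rw [hkval, hzfst] at hle1
    have hbest := h3 (le_antisymm hle1 (hminx _ h0 h1))
    show Left_index (p :: ps) = Left_index_alt (p :: ps)
    rw [pv_alt_eq, ← hminxdef, hbest]
    rfl
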